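-- pv_equiv track=rewrite | github.com/dipseth/google_workspace_fastmcp2 | gchat/card_builder/jinja_styling.py | apply_style_to_text
-- ===== SOURCE A (Python) =====
-- from typing import Any, Dict, List, Optional
--
-- SUCCESS_KEYWORDS = frozenset([
--     "online", "success", "ok", "active", "running", "healthy", "ready", "up",
--     "connected", "enabled", "available", "complete", "done"
-- ])
--
-- ERROR_KEYWORDS = frozenset([
--     "error", "fail", "offline", "down", "unhealthy", "critical", "dead",
--     "disconnected", "disabled", "unavailable", "stopped"
-- ])
--
-- WARNING_KEYWORDS = frozenset([
--     "warning", "pending", "slow", "degraded", "unknown", "wait", "timeout",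
--     "retry", "limited"
-- ])
--
-- def get_style_for_text(
--     text: str,
--     style_metadata: Dict[str, List[str]],
-- ) -> Optional[str]:
--     """Determine which style to apply based on text content and available styles.
--
--     If ANY semantic style is present in the pattern, we enable full semantic
--     styling based on content keywords. This allows a single "success" pattern
--     to also style "error" and "warning" content appropriately.
--
--     Args:
--         text: Text content to analyze
--         style_metadata: Style metadata with keys:
--             - semantic_styles: ["success", "error", "warning", "info"]
--
--     Returns:
--         The Jinja filter name (e.g., "success_text") or None if no match.
--     """
--     if not text or not isinstance(text, str):
--         return None
--
--     semantic_styles = style_metadata.get("semantic_styles", [])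
--     if not semantic_styles:
--         return None
--
--     text_lower = text.lower()
--
--     # If ANY semantic style is present, enable full semantic styling
--     enable_all_semantic = len(semantic_styles) > 0
--
--     # Check for success keywords
--     if enable_all_semantic or "success" in semantic_styles:
--         if any(word in text_lower for word in SUCCESS_KEYWORDS):
--             return "success_text"
--
--     # Check for error keywords
--     if enable_all_semantic or "error" in semantic_styles:
--         if any(word in text_lower for word in ERROR_KEYWORDS):
--             return "error_text"
--
--     # Check for warning keywords
--     if enable_all_semantic or "warning" in semantic_styles:
--         if any(word in text_lower for word in WARNING_KEYWORDS):
--             return "warning_text"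
--
--     # Info is fallback only if explicitly in semantic_styles
--     if "info" in semantic_styles:
--         return "info_text"
--
--     return None
--
-- def apply_style_to_text(
--     text: str,
--     style_metadata: Dict[str, List[str]],
-- ) -> str:
--     """Apply style to a single text string based on its content.
--
--     Returns styled text with Jinja template if applicable, otherwise original text.
--     """
--     # Skip if already has Jinja styling
--     if "{{" in text and "|" in text:
--         return text
--
--     style_to_apply = get_style_for_text(text, style_metadata)
--     if not style_to_apply:
--         return text
--
--     # Escape single quotes for Jinja template
--     escaped_text = text.replace("'", "\\'")
--     styled_text = f"{{{{ '{escaped_text}' | {style_to_apply} }}}}"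
--
--     # Add formatting filters if present
--     formatting = style_metadata.get("formatting", [])
--     for fmt in formatting:
--         styled_text = styled_text[:-3] + f" | {fmt} }}}}"
--
--     return styled_text
-- ===== SOURCE B (Python) =====
-- SUCCESS_KEYWORDS = frozenset([
--     "online", "success", "ok", "active", "running", "healthy", "ready", "up",
--     "connected", "enabled", "available", "complete", "done"
-- ])
--
-- ERROR_KEYWORDS = frozenset([
--     "error", "fail", "offline", "down", "unhealthy", "critical", "dead",
--     "disconnected", "disabled", "unavailable", "stopped"
-- ])
--
-- WARNING_KEYWORDS = frozenset([
--     "warning", "pending", "slow", "degraded", "unknown", "wait", "timeout",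
--     "retry", "limited"
-- ])
--
-- # One flat keyword -> priority-rank map (0 = success, 1 = error, 2 = warning);
-- # the sets are pairwise disjoint, and min() makes the dict order irrelevant.
-- _FILTER_BY_RANK = ("success_text", "error_text", "warning_text")
-- _RANK = {}
-- for _r, _kws in enumerate((SUCCESS_KEYWORDS, ERROR_KEYWORDS, WARNING_KEYWORDS)):
--     for _w in _kws:
--         _RANK[_w] = _r
--
--
-- def apply_style_to_text(text, style_metadata):
--     """Apply style to a single text string based on its content.
--
--     Instead of three staged per-category scans, take the global MINIMUM priority
--     rank over all matching keywords in one pass, and build the Jinja filter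
--     chain once with " | ".join instead of re-slicing the template per filter.
--     """
--     if "{{" in text and "|" in text:
--         return text
--     style = None
--     if text and isinstance(text, str):
--         semantic_styles = style_metadata.get("semantic_styles", [])
--         if semantic_styles:
--             text_lower = text.lower()
--             best = min((rank for word, rank in _RANK.items() if word in text_lower),
--                        default=None)
--             if best is not None:
--                 style = _FILTER_BY_RANK[best]
--             elif "info" in semantic_styles:
--                 style = "info_text"
--     if style is None:
--         return text
--     escaped = text.replace("'", "\\'")
--     chain = " | ".join([style] + style_metadata.get("formatting", []))
--     return "{{ '" + escaped + "' | " + chain + " }}"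
-- ===== Notes on version B (the rewrite author's own statement) =====
-- stated objective: alternative
-- what changed: B replaces A's three staged per-category keyword scans by a single pass over one flat keyword->priority-rank map taking the global minimum rank of any matching keyword (then indexing a rank->filter table), and assembles the Jinja filter chain once with ' | '.join([style]+formatting) instead of A's repeated strip-last-3-chars-and-reappend loop.
import Mathlib
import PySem

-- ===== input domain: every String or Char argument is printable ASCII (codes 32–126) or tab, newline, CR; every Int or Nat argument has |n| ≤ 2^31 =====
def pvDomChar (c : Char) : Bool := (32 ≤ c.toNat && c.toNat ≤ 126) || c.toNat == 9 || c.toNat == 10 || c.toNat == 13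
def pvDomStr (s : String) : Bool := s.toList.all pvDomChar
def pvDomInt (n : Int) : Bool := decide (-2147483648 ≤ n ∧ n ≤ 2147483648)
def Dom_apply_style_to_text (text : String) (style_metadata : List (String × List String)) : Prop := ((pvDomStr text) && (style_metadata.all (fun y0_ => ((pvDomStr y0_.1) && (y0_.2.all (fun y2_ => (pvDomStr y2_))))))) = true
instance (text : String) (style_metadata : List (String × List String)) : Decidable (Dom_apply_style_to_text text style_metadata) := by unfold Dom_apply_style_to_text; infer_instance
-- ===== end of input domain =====

-- B replaces A's three staged per-category keyword scans by one pass over a flat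
-- keyword->priority-rank map taking the global minimum matching rank, and builds the
-- Jinja filter chain once with " | ".join instead of A's slice-off-the-tail loop;
-- objective: alternative (same behaviour, different algorithm).

-- ===== PORT A =====
def pvSuccessKeywords : List String :=
  ["online", "success", "ok", "active", "running", "healthy", "ready", "up",
   "connected", "enabled", "available", "complete", "done"]

def pvErrorKeywords : List String :=
  ["error", "fail", "offline", "down", "unhealthy", "critical", "dead",
   "disconnected", "disabled", "unavailable", "stopped"]

def pvWarningKeywords : List String :=
  ["warning", "pending", "slow", "degraded", "unknown", "wait", "timeout",
   "retry", "limited"]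

def get_style_for_text (text : String) (style_metadata : List (String × List String)) : Option String :=
  if text = "" then none else
  let semantic_styles := (PySem.Dict.mk style_metadata).getD "semantic_styles" []
  if semantic_styles = [] then none else
  let text_lower := PySem.Str.lower text
  let enable_all_semantic := decide (0 < semantic_styles.length)
  if (enable_all_semantic || semantic_styles.contains "success") &&
      pvSuccessKeywords.any (fun w => PySem.Str.isIn w text_lower) then some "success_text"
  else if (enable_all_semantic || semantic_styles.contains "error") &&
      pvErrorKeywords.any (fun w => PySem.Str.isIn w text_lower) then some "error_text"
  else if (enable_all_semantic || semantic_styles.contains "warning") &&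
      pvWarningKeywords.any (fun w => PySem.Str.isIn w text_lower) then some "warning_text"
  else if semantic_styles.contains "info" then some "info_text"
  else none

def apply_style_to_text (text : String) (style_metadata : List (String × List String)) : String :=
  if PySem.Str.isIn "{{" text && PySem.Str.isIn "|" text then text else
  match get_style_for_text text style_metadata with
  | none => text
  | some style_to_apply =>
    let escaped_text := PySem.Str.replace text "'" "\\'"
    let styled_text := "{{ '" ++ escaped_text ++ "' | " ++ style_to_apply ++ " }}"
    let formatting := (PySem.Dict.mk style_metadata).getD "formatting" []
    formatting.foldl
      (fun s fmt => PySem.Str.slice s none (some (-3)) ++ " | " ++ fmt ++ " }}") styled_text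

-- ===== PORT B =====
def pvFilterByRank : List String := ["success_text", "error_text", "warning_text"]

-- _RANK.items(): the flat keyword -> rank association built by Source B's module-level loop
-- (the sets are disjoint; min() makes the iteration order of each frozenset irrelevant)
def pvRankTable : List (String × Int) :=
  pvSuccessKeywords.map (fun w => (w, 0)) ++
  pvErrorKeywords.map (fun w => (w, 1)) ++
  pvWarningKeywords.map (fun w => (w, 2))

def apply_style_to_text_alt (text : String) (style_metadata : List (String × List String)) : String :=
  if PySem.Str.isIn "{{" text && PySem.Str.isIn "|" text then text else
  let style : Option String :=
    if text = "" then none else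
    let semantic_styles := (PySem.Dict.mk style_metadata).getD "semantic_styles" []
    if semantic_styles = [] then none else
    let text_lower := PySem.Str.lower text
    let best := PySem.List.min?
      (pvRankTable.filterMap (fun p => if PySem.Str.isIn p.1 text_lower then some p.2 else none))
      (fun r => r)
    match best with
    | some b => PySem.List.pyGet? pvFilterByRank b  -- _FILTER_BY_RANK[best]; b ∈ {0,1,2} so never IndexError
    | none => if semantic_styles.contains "info" then some "info_text" else none
  match style with
  | none => text
  | some s =>
    let escaped := PySem.Str.replace text "'" "\\'"
    let chain := PySem.Str.join " | " (s :: (PySem.Dict.mk style_metadata).getD "formatting" [])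
    "{{ '" ++ escaped ++ "' | " ++ chain ++ " }}"

-- ===== PRECONDITION & SPEC =====
def Spec_apply_style_to_text (text : String) (style_metadata : List (String × List String)) (out : String) : Prop := out = apply_style_to_text_alt text style_metadata
instance (text : String) (style_metadata : List (String × List String)) (out : String) : Decidable (Spec_apply_style_to_text text style_metadata out) := by unfold Spec_apply_style_to_text; infer_instance

-- ===== CLAIM (what is proved, stated in full; the proofs are below) =====
def Claim_equal_apply_style_to_text : Prop := ∀ (text : String) (style_metadata : List (String × List String)), Dom_apply_style_to_text text style_metadata → Spec_apply_style_to_text text style_metadata (apply_style_to_text text style_metadata)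

-- ===== LEMMAS AND PROOFS =====

theorem foldl_min_of_le {c : Int} {l : List Int} (h : ∀ x ∈ l, c ≤ x) :
    l.foldl min c = c := by
  induction l with
  | nil => rfl
  | cons x t ih =>
    have hx : min c x = c := min_eq_left (h x (by simp))
    simp only [List.foldl_cons, hx]
    exact ih (fun y hy => h y (by simp [hy]))

theorem filterMap_map_const (l : List String) (q : String → Bool) (c : Int) :
    (l.map (fun w => (w, c))).filterMap
      (fun p => if q p.1 then some p.2 else none) =
    List.replicate (l.countP q) c := by
  induction l with
  | nil => rfl
  | cons x t ih =>
    by_cases hq : q x = true <;>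
      simp [hq, ih, List.replicate_succ]

theorem min_rep (a b c : Nat) :
    PySem.List.min?
      (List.replicate a (0:Int) ++ List.replicate b 1 ++ List.replicate c 2)
      (fun r => r) =
    (if a ≠ 0 then some 0 else if b ≠ 0 then some (1:Int) else if c ≠ 0 then some 2 else none) := by
  have hmem : ∀ (a b c : Nat) (x : Int),
      x ∈ List.replicate a (0:Int) ++ List.replicate b 1 ++ List.replicate c 2 → 0 ≤ x := by
    intro a b c x hx
    simp only [List.mem_append, List.mem_replicate] at hx
    rcases hx with (⟨_, h⟩ | ⟨_, h⟩) | ⟨_, h⟩ <;> omega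
  cases a with
  | succ a' =>
    simp only [List.replicate_succ, List.cons_append, PySem.List.min?_id_cons,
      Nat.succ_ne_zero, ne_eq, not_false_iff, if_true]
    rw [foldl_min_of_le (fun x hx => hmem a' b c x hx)]
  | zero =>
    cases b with
    | succ b' =>
      have hmem1 : ∀ x ∈ List.replicate b' (1:Int) ++ List.replicate c 2, 1 ≤ x := by
        intro x hx
        simp only [List.mem_append, List.mem_replicate] at hx
        rcases hx with ⟨_, h⟩ | ⟨_, h⟩ <;> omega
      simp only [List.replicate_zero, List.nil_append, List.replicate_succ, List.cons_append,
        PySem.List.min?_id_cons]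
      rw [foldl_min_of_le hmem1]
      simp
    | zero =>
      cases c with
      | succ c' =>
        have hmem2 : ∀ x ∈ List.replicate c' (2:Int), 2 ≤ x := by
          intro x hx; simp only [List.mem_replicate] at hx; omega
        simp only [List.replicate_zero, List.nil_append, List.replicate_succ,
          PySem.List.min?_id_cons]
        rw [foldl_min_of_le hmem2]
        simp
      | zero => simp [PySem.List.min?]

theorem countP_ne_zero_iff_any (l : List String) (q : String → Bool) :
    (l.countP q ≠ 0) ↔ l.any q = true := by
  rw [Ne, List.countP_eq_zero]
  simp [List.any_eq_true]

-- B's global-minimum-rank selection agrees with A's staged category checks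
theorem best_eq (tl : String) :
    PySem.List.min?
      (pvRankTable.filterMap (fun p => if PySem.Str.isIn p.1 tl then some p.2 else none))
      (fun r => r) =
    (if pvSuccessKeywords.any (fun w => PySem.Str.isIn w tl) then some 0
     else if pvErrorKeywords.any (fun w => PySem.Str.isIn w tl) then some (1:Int)
     else if pvWarningKeywords.any (fun w => PySem.Str.isIn w tl) then some 2
     else none) := by
  unfold pvRankTable
  rw [List.filterMap_append, List.filterMap_append]
  rw [filterMap_map_const pvSuccessKeywords (fun w => PySem.Str.isIn w tl) 0,
      filterMap_map_const pvErrorKeywords (fun w => PySem.Str.isIn w tl) 1,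
      filterMap_map_const pvWarningKeywords (fun w => PySem.Str.isIn w tl) 2, min_rep]
  simp only [ne_eq, countP_ne_zero_iff_any]

theorem pick_eq (text : String) (md : List (String × List String)) :
    get_style_for_text text md =
      (if text = "" then none else
       let semantic_styles := (PySem.Dict.mk md).getD "semantic_styles" []
       if semantic_styles = [] then none else
       let text_lower := PySem.Str.lower text
       match PySem.List.min?
          (pvRankTable.filterMap (fun p => if PySem.Str.isIn p.1 text_lower then some p.2 else none))
          (fun r => r) with
       | some b => PySem.List.pyGet? pvFilterByRank b
       | none => if semantic_styles.contains "info" then some "info_text" else none) := by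
  unfold get_style_for_text
  by_cases h1 : text = "" <;> simp only [h1, if_true, if_false]
  by_cases h2 : (PySem.Dict.mk md).getD "semantic_styles" [] = ([] : List String) <;>
    simp only [h2, if_true, if_false]
  have hlen : decide (0 < ((PySem.Dict.mk md).getD "semantic_styles" ([] : List String)).length) = true := by
    simpa [List.length_pos_iff] using h2
  rw [best_eq]
  simp only [hlen, Bool.true_or, Bool.true_and]
  by_cases hS : (pvSuccessKeywords.any fun w => PySem.Chars.isIn w.toList (PySem.Chars.lower text.toList)) = true <;>
  by_cases hE : (pvErrorKeywords.any fun w => PySem.Chars.isIn w.toList (PySem.Chars.lower text.toList)) = true <;>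
  by_cases hW : (pvWarningKeywords.any fun w => PySem.Chars.isIn w.toList (PySem.Chars.lower text.toList)) = true <;>
    simp [hS, hE, hW, PySem.List.pyGet?, PySem.List.pyIdx?, pvFilterByRank]

-- the suffix " | ".toList ++ f.toList contributed by each formatting filter
def pvJ (fmts : List String) : List Char :=
  (fmts.map (fun f => " | ".toList ++ f.toList)).flatten

theorem slice_drop3 (t : String) :
    PySem.Str.slice (t ++ " }}") none (some (-3)) = t := by
  rw [← String.toList_inj]
  rw [PySem.Str.toList_slice, PySem.Chars.slice_eq_listSlice, String.toList_append]
  rw [PySem.List.slice_to_neg_ofNat _ 3 (by omega)]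
  simp

theorem loop_eq_join_aux (fmts : List String) (t : String) :
    (fmts.foldl (fun s fmt => PySem.Str.slice s none (some (-3)) ++ " | " ++ fmt ++ " }}")
      (t ++ " }}")).toList = t.toList ++ pvJ fmts ++ " }}".toList := by
  induction fmts generalizing t with
  | nil => simp [pvJ]
  | cons f fs ih =>
    simp only [List.foldl_cons, slice_drop3]
    have hstep : t ++ " | " ++ f ++ " }}" = (t ++ " | " ++ f) ++ " }}" := by
      simp [String.append_assoc]
    rw [hstep, ih]
    simp [pvJ, String.toList_append, List.append_assoc]

theorem join_cons_eq (x : List Char) (fmts : List String) :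
    PySem.Chars.join " | ".toList (x :: fmts.map String.toList) = x ++ pvJ fmts := by
  induction fmts generalizing x with
  | nil => simp [pvJ, PySem.Chars.join_singleton]
  | cons f fs ih =>
    simp only [List.map_cons, PySem.Chars.join_cons_cons, ih]
    simp [pvJ, List.append_assoc]

-- ===== VERDICT (by name: the statement is the Claim_ definition above) =====
theorem apply_style_to_text_spec : Claim_equal_apply_style_to_text := by
  intro text md _
  unfold Spec_apply_style_to_text apply_style_to_text apply_style_to_text_alt
  by_cases hg : (PySem.Str.isIn "{{" text && PySem.Str.isIn "|" text) = true
  · rw [if_pos hg, if_pos hg]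
  rw [if_neg hg, if_neg hg, pick_eq]
  cases hs : (if text = "" then none else
       let semantic_styles := (PySem.Dict.mk md).getD "semantic_styles" []
       if semantic_styles = [] then none else
       let text_lower := PySem.Str.lower text
       match PySem.List.min?
          (pvRankTable.filterMap (fun p => if PySem.Str.isIn p.1 text_lower then some p.2 else none))
          (fun r => r) with
       | some b => PySem.List.pyGet? pvFilterByRank b
       | none => if semantic_styles.contains "info" then some "info_text" else none : Option String) with
  | none => rfl
  | some style =>
    simp only []
    rw [← String.toList_inj]
    have hshape : "{{ '" ++ PySem.Str.replace text "'" "\\'" ++ "' | " ++ style ++ " }}" =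
        ("{{ '" ++ PySem.Str.replace text "'" "\\'" ++ "' | " ++ style) ++ " }}" := by
      simp [String.append_assoc]
    rw [hshape, loop_eq_join_aux]
    simp only [String.toList_append, PySem.Str.toList_join, List.map_cons, join_cons_eq]
    simp [List.append_assoc]
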